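-- pv_equiv track=rewrite | github.com/Klipper3d/klipper | klippy/extras/bme280.py | _calculate_gas_heater_duration
-- ===== SOURCE A (Python) =====
-- def _calculate_gas_heater_duration(duration_ms):
--     if duration_ms >= 4032:
--         duration_reg = 0xff
--     else:
--         factor = 0
--         while duration_ms > 0x3F:
--             duration_ms //= 4
--             factor += 1
--         duration_reg = duration_ms + (factor * 64)
--
--     return duration_reg
-- ===== SOURCE B (Python) =====
-- def _calculate_gas_heater_duration(duration_ms):
--     if duration_ms >= 4032:
--         return 0xff
--     if duration_ms <= 0x3F:
--         return duration_ms
--     if duration_ms <= 0xFF: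
--         return duration_ms // 4 + 64
--     if duration_ms <= 0x3FF:
--         return duration_ms // 16 + 128
--     return duration_ms // 64 + 192
-- ===== Notes on version B (the rewrite author's own statement) =====
-- stated objective: simpler
-- what changed: Replaces the divide-by-four while-loop accumulating a factor with a closed-form if/elif chain over the interval thresholds, performing a single floor division by the matching power of four.
import Mathlib
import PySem

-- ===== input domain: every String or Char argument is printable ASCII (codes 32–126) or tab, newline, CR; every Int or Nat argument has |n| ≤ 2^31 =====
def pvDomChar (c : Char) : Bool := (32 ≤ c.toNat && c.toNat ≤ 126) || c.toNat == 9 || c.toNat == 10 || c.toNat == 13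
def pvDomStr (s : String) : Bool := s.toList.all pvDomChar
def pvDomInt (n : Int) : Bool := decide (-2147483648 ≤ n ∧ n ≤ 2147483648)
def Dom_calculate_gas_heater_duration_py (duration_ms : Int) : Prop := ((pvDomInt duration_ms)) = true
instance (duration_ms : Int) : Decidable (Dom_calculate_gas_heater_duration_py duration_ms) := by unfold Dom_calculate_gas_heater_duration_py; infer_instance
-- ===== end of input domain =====

-- B replaces A's divide-by-four while-loop with a closed-form if/elif chain over the interval thresholds (objective: simpler).


-- ===== PORT A =====
-- A's while-loop: divide by 4, counting factor, until duration_ms ≤ 0x3F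
def gasLoopA (duration_ms factor : Int) : Int :=
  if duration_ms > 0x3F then
    gasLoopA (PySem.Int.floordiv duration_ms 4) (factor + 1)
  else duration_ms + factor * 64
termination_by duration_ms.toNat
decreasing_by
  have h4 : PySem.Int.floordiv duration_ms 4 = duration_ms / 4 :=
    PySem.Int.floordiv_eq_ediv_of_pos (by omega)
  rw [h4]; omega

def calculate_gas_heater_duration_py (duration_ms : Int) : Int :=
  if duration_ms ≥ 4032 then 0xff
  else gasLoopA duration_ms 0

-- ===== PORT B =====
def calculate_gas_heater_duration_py_alt (duration_ms : Int) : Int :=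
  if duration_ms ≥ 4032 then 0xff
  else if duration_ms ≤ 0x3F then duration_ms
  else if duration_ms ≤ 0xFF then PySem.Int.floordiv duration_ms 4 + 64
  else if duration_ms ≤ 0x3FF then PySem.Int.floordiv duration_ms 16 + 128
  else PySem.Int.floordiv duration_ms 64 + 192

-- ===== PRECONDITION & SPEC =====
def Spec_calculate_gas_heater_duration_py (duration_ms : Int) (out : Int) : Prop := out = calculate_gas_heater_duration_py_alt duration_ms
instance (duration_ms : Int) (out : Int) : Decidable (Spec_calculate_gas_heater_duration_py duration_ms out) := by unfold Spec_calculate_gas_heater_duration_py; infer_instance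

-- ===== CLAIM (what is proved, stated in full; the proofs are below) =====
def Claim_equal_calculate_gas_heater_duration_py : Prop := ∀ (duration_ms : Int), Dom_calculate_gas_heater_duration_py duration_ms → Spec_calculate_gas_heater_duration_py duration_ms (calculate_gas_heater_duration_py duration_ms)

-- ===== LEMMAS AND PROOFS =====

-- ===== VERDICT (by name: the statement is the Claim_ definition above) =====
theorem floordiv4_pos_div (d : Int) (h : (63:Int) < d) :
    PySem.Int.floordiv d 4 = d / 4 := PySem.Int.floordiv_eq_ediv_of_pos (by omega)

theorem gasLoopA_eq (d f : Int) (hd : d < 4032) :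
    gasLoopA d f =
      (if d ≤ 0x3F then d + f * 64
       else if d ≤ 0xFF then d / 4 + (f + 1) * 64
       else if d ≤ 0x3FF then d / 16 + (f + 2) * 64
       else d / 64 + (f + 3) * 64) := by
  by_cases h1 : d ≤ 0x3F
  · rw [gasLoopA]; simp [h1]
  · rw [gasLoopA]
    by_cases h2 : d ≤ 0xFF
    · rw [gasLoopA]
      have e1 := floordiv4_pos_div d (by omega)
      simp only [e1]
      have : ¬ d / 4 > 0x3F := by omega
      simp [h1, h2, this]
    · by_cases h3 : d ≤ 0x3FF
      · rw [gasLoopA, gasLoopA]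
        have e1 := floordiv4_pos_div d (by omega)
        have h4 : (63:Int) < d / 4 := by omega
        have e2 := floordiv4_pos_div (d / 4) h4
        simp only [e1, e2]
        have h5 : ¬ d / 4 / 4 > 0x3F := by omega
        simp [show d > 0x3F by omega, h4, h5]
        omega
      · rw [gasLoopA, gasLoopA, gasLoopA]
        have e1 := floordiv4_pos_div d (by omega)
        have h4 : (63:Int) < d / 4 := by omega
        have e2 := floordiv4_pos_div (d / 4) h4
        have h5 : (63:Int) < d / 4 / 4 := by omega
        have e3 := floordiv4_pos_div (d / 4 / 4) h5
        simp only [e1, e2, e3]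
        have h6 : ¬ d / 4 / 4 / 4 > 0x3F := by omega
        simp [show d > 0x3F by omega, h4, h5, h6, h1, h2, h3]
        omega

theorem calculate_gas_heater_duration_py_spec : Claim_equal_calculate_gas_heater_duration_py := by
  intro d _hdom
  unfold Spec_calculate_gas_heater_duration_py
  unfold calculate_gas_heater_duration_py calculate_gas_heater_duration_py_alt
  by_cases hb : d ≥ 4032
  · simp [hb]
  · have hlt : d < 4032 := by omega
    rw [gasLoopA_eq d 0 hlt]
    simp only [hb, if_false]
    by_cases h1 : d ≤ 0x3F
    · simp [h1]
    · by_cases h2 : d ≤ 0xFF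
      · simp [h1, h2]
      · by_cases h3 : d ≤ 0x3FF
        · simp only [h1, h2, h3, if_false, if_true]
          rw [PySem.Int.floordiv_eq_ediv_of_pos (by omega : (0:Int) < 16)]
          omega
        · simp only [h1, h2, h3, if_false]
          rw [PySem.Int.floordiv_eq_ediv_of_pos (by omega : (0:Int) < 64)]
          omega
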